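-- pv_equiv track=rewrite | github.com/Perlmint/QuacksTwit | gen.py | getTypeHeader
-- ===== SOURCE A (Python) =====
-- TYPE_MAP = {
--     'str': 'std::string',
--     'ID': 'std::string',
--     'bool': 'bool',
--     'dbl': 'double',
--     'int': 'int',
--     'uint': 'unsigned int',
--     'date': 'std::chrono::system_clock::time_point'
-- }
--
-- TYPE_HDR_MAP = {
--     'str': 'string',
--     'ID': 'string',
--     'date': 'chrono'
-- }
--
-- def getTypeHeader(typename, internal = False):
--     postfix = '_internal' if internal else ''
--     if typename in TYPE_HDR_MAP:
--         return (TYPE_HDR_MAP[typename],)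
--     elif typename in TYPE_MAP:
--         return ()
--     if typename[-2:] == '[]':
--         return getTypeHeader(typename[:-2], internal) + ('deque', )
--     return (typename + postfix, )
-- ===== SOURCE B (Python) =====
-- TYPE_MAP = {
--     'str': 'std::string',
--     'ID': 'std::string',
--     'bool': 'bool',
--     'dbl': 'double',
--     'int': 'int',
--     'uint': 'unsigned int',
--     'date': 'std::chrono::system_clock::time_point'
-- }
--
-- TYPE_HDR_MAP = {
--     'str': 'string',
--     'ID': 'string',
--     'date': 'chrono'
-- }
--
-- def getTypeHeader(typename, internal = False):
--     # Iterative: strip trailing '[]' pairs counting depth, then one base lookup.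
--     count = 0
--     while typename.endswith('[]'):
--         typename = typename[:-2]
--         count += 1
--     if typename in TYPE_HDR_MAP:
--         base = (TYPE_HDR_MAP[typename],)
--     elif typename in TYPE_MAP:
--         base = ()
--     else:
--         base = (typename + ('_internal' if internal else ''),)
--     return base + ('deque',) * count
-- ===== Notes on version B (the rewrite author's own statement) =====
-- stated objective: alternative
-- what changed: Replaces A's recursion (one self-call per trailing array-bracket pair) with an iterative loop that strips all trailing bracket pairs while counting the nesting depth, then performs the base map lookup once and appends that many container entries.
import Mathlib
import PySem

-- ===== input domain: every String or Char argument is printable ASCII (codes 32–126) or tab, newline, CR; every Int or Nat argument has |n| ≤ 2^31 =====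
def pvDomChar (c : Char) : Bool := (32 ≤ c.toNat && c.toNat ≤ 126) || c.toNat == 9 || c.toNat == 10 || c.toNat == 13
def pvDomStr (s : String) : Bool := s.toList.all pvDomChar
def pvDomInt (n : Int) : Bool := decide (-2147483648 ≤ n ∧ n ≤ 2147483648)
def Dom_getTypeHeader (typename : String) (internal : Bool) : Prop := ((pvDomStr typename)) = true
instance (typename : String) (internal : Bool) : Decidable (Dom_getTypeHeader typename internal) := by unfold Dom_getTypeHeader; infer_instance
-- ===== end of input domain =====

-- B replaces A's recursion (one self-call per trailing array-bracket pair) with an iterative strip-and-count loop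
-- followed by a single base lookup; same cost, different decomposition ('alternative').

-- ===== PORT A =====
-- the module-level dicts, keyed on code points (List Char) since the ports work on .toList
def pvTypeMap : PySem.Dict (List Char) String := PySem.Dict.mk
  [("str".toList, "std::string"), ("ID".toList, "std::string"), ("bool".toList, "bool"),
   ("dbl".toList, "double"), ("int".toList, "int"), ("uint".toList, "unsigned int"),
   ("date".toList, "std::chrono::system_clock::time_point")]
def pvTypeHdrMap : PySem.Dict (List Char) String := PySem.Dict.mk
  [("str".toList, "string"), ("ID".toList, "string"), ("date".toList, "chrono")]

-- A's recursion, on code points; typename[-2:] is PySem.Chars.slice cs (some (-2)) none,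
-- typename[:-2] is PySem.Chars.slice cs none (some (-2))
def getTypeHeaderCore (cs : List Char) (internal : Bool) : List String :=
  let pfx := if internal then "_internal" else ""   -- 'postfix' is a Lean keyword
  match pvTypeHdrMap.get? cs with
  | some h => [h]
  | none =>
    if (pvTypeMap.get? cs).isSome then []
    else if hs : PySem.Chars.slice cs (some (-2)) none = "[]".toList then
      getTypeHeaderCore (PySem.Chars.slice cs none (some (-2))) internal ++ ["deque"]
    else [String.ofList (cs ++ pfx.toList)]
termination_by cs.length
decreasing_by
  have h2 := congrArg List.length hs
  rw [PySem.Chars.slice_eq_listSlice, PySem.List.slice_from_neg_ofNat cs 2 (by omega)] at h2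
  simp at h2
  rw [PySem.Chars.slice_eq_listSlice, PySem.List.slice_to_neg_ofNat cs 2 (by omega)]
  simp only [List.length_take]
  omega

def getTypeHeader (typename : String) (internal : Bool) : List String :=
  getTypeHeaderCore typename.toList internal

-- ===== PORT B =====
-- the while-loop: strip trailing '[]' pairs, counting them
def stripArr (cs : List Char) (count : Nat) : List Char × Nat :=
  if h : PySem.Chars.endswith cs "[]".toList then
    stripArr (PySem.Chars.slice cs none (some (-2))) (count + 1)
  else (cs, count)
termination_by cs.length
decreasing_by
  rw [PySem.Chars.endswith_iff] at h
  have h2 : 2 ≤ cs.length := by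
    have := h.length_le; simpa using this
  rw [PySem.Chars.slice_eq_listSlice, PySem.List.slice_to_neg_ofNat cs 2 (by omega)]
  simp only [List.length_take]
  omega

-- the base lookup, done once
def baseHeader (cs : List Char) (internal : Bool) : List String :=
  match pvTypeHdrMap.get? cs with
  | some h => [h]
  | none =>
    if (pvTypeMap.get? cs).isSome then []
    else [String.ofList (cs ++ (if internal then "_internal" else "").toList)]

def getTypeHeader_alt (typename : String) (internal : Bool) : List String :=
  match stripArr typename.toList 0 with
  | (base, count) => baseHeader base internal ++ List.replicate count "deque"

-- ===== PRECONDITION & SPEC =====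
def Spec_getTypeHeader (typename : String) (internal : Bool) (out : List String) : Prop := out = getTypeHeader_alt typename internal
instance (typename : String) (internal : Bool) (out : List String) : Decidable (Spec_getTypeHeader typename internal out) := by unfold Spec_getTypeHeader; infer_instance

-- ===== CLAIM (what is proved, stated in full; the proofs are below) =====
def Claim_equal_getTypeHeader : Prop := ∀ (typename : String) (internal : Bool), Dom_getTypeHeader typename internal → Spec_getTypeHeader typename internal (getTypeHeader typename internal)

-- ===== LEMMAS AND PROOFS =====

-- A's condition typename[-2:] == '[]' is exactly B's typename.endswith('[]')
lemma slice_cond_iff_endswith (cs : List Char) :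
    PySem.Chars.slice cs (some (-2)) none = "[]".toList ↔ PySem.Chars.endswith cs "[]".toList = true := by
  rw [PySem.Chars.endswith_iff, PySem.Chars.slice_eq_listSlice,
      PySem.List.slice_from_neg_ofNat cs 2 (by omega)]
  constructor
  · intro h; rw [← h]; exact List.drop_suffix _ _
  · intro h
    obtain ⟨p, hp⟩ := h
    subst hp
    simp

-- no key of either dict ends in '[]'
lemma lookups_none_of_endswith (cs : List Char)
    (h : PySem.Chars.endswith cs "[]".toList = true) :
    pvTypeHdrMap.get? cs = none ∧ pvTypeMap.get? cs = none := by
  rw [PySem.Chars.endswith_iff] at h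
  have hne : ∀ s : List Char, ¬ ("[]".toList <:+ s) → (s == cs) = false := by
    intro s hs
    exact beq_eq_false_iff_ne.mpr (fun he => hs (he ▸ h))
  clear hne
  constructor <;> simp [pvTypeHdrMap, pvTypeMap, PySem.Dict.get?] <;>
    (repeat' constructor) <;> (rintro rfl; exact absurd h (by decide))

-- stripping '[]' really shortens the string
lemma slice_len_lt (cs : List Char)
    (h : PySem.Chars.endswith cs "[]".toList = true) :
    (PySem.Chars.slice cs none (some (-2))).length < cs.length := by
  rw [PySem.Chars.endswith_iff] at h
  have h2 : 2 ≤ cs.length := by have := h.length_le; simpa using this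
  rw [PySem.Chars.slice_eq_listSlice, PySem.List.slice_to_neg_ofNat cs 2 (by omega)]
  simp only [List.length_take]
  omega

-- the accumulator of stripArr only shifts the count
lemma stripArr_acc : ∀ (n : Nat) (cs : List Char), cs.length ≤ n → ∀ c,
    stripArr cs c = ((stripArr cs 0).1, (stripArr cs 0).2 + c) := by
  intro n
  induction n with
  | zero =>
    intro cs hlen c
    have hcs : cs = [] := List.length_eq_zero_iff.mp (Nat.le_zero.mp hlen)
    subst hcs
    rw [stripArr, dif_neg (by decide), stripArr, dif_neg (by decide)]
    simp
  | succ n ih =>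
    intro cs hlen c
    by_cases h : PySem.Chars.endswith cs "[]".toList = true
    · have hlt := slice_len_lt cs h
      rw [stripArr, dif_pos h]
      conv_rhs => rw [stripArr, dif_pos h]
      rw [ih _ (by omega) (c + 1), ih _ (by omega) (0 + 1)]
      simp only [Prod.mk.injEq]
      exact ⟨trivial, by omega⟩
    · rw [stripArr, dif_neg h, stripArr, dif_neg h]
      simp

-- main: A's recursion computes B's strip-then-lookup result
lemma core_eq_alt : ∀ (n : Nat) (cs : List Char), cs.length ≤ n → ∀ (internal : Bool),
    getTypeHeaderCore cs internal =
      baseHeader (stripArr cs 0).1 internal ++ List.replicate (stripArr cs 0).2 "deque" := by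
  intro n
  induction n with
  | zero =>
    intro cs hlen internal
    have hcs : cs = [] := List.length_eq_zero_iff.mp (Nat.le_zero.mp hlen)
    subst hcs
    rw [stripArr, dif_neg (by decide)]
    rw [getTypeHeaderCore]
    rfl
  | succ n ih =>
    intro cs hlen internal
    by_cases h : PySem.Chars.endswith cs "[]".toList = true
    · -- the recursive / loop case
      have hlt := slice_len_lt cs h
      obtain ⟨hget, hmap⟩ := lookups_none_of_endswith cs h
      rw [stripArr, dif_pos h]
      rw [show (0 : Nat) + 1 = 1 from rfl]
      rw [stripArr_acc (PySem.Chars.slice cs none (some (-2))).length _ le_rfl 1]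
      rw [getTypeHeaderCore]
      simp only [hget, hmap, Option.isSome_none, Bool.false_eq_true, if_false]
      rw [dif_pos ((slice_cond_iff_endswith cs).mpr h)]
      rw [ih _ (by omega) internal]
      simp [List.replicate_succ']
    · -- the base case: no trailing '[]'
      rw [stripArr, dif_neg h]
      have hsl : ¬ PySem.List.slice cs (some (-2)) none = ['[', ']'] := by
        intro hc
        apply h
        apply (slice_cond_iff_endswith cs).mp
        rw [PySem.Chars.slice_eq_listSlice, hc]
        decide
      rw [getTypeHeaderCore]
      rcases hget : pvTypeHdrMap.get? cs with _ | v
      · simp only [baseHeader, hget]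
        rcases hmap : (pvTypeMap.get? cs).isSome with _ | _
        · simp only [Bool.false_eq_true, if_false]
          simp [hsl]
        · simp
      · simp [baseHeader, hget]

-- ===== VERDICT (by name: the statement is the Claim_ definition above) =====
theorem getTypeHeader_spec : Claim_equal_getTypeHeader := by
  intro typename internal _
  unfold Spec_getTypeHeader getTypeHeader getTypeHeader_alt
  rw [core_eq_alt typename.toList.length typename.toList le_rfl internal]
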